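-- pv_equiv track=rewrite | github.com/KoPasha/py_questionSearcher | questionData.py | get_string_adopted_for_search
-- ===== SOURCE A (Python) =====
-- def get_string_adopted_for_search(search_string,is_query = False):
--     result_string = ''
--     prev_char = ''
--     for curr_char in search_string.lower():
--         if curr_char.isdigit() != prev_char.isdigit():#all times when digits comes right next to letter, they must be separated by blank
--             result_string = result_string + ' '
--         if curr_char.isdigit() or curr_char.isalpha():
--             result_string = result_string + curr_char
--         elif (curr_char == '*') and is_query:#asterisk is a special char, and its always comes last in a word (only for query strings, data strings get asterisks as blanks)
--             result_string = f'{result_string}{curr_char} '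
--         else:
--             result_string = result_string + ' '
--         prev_char = curr_char
--     return ' '.join(result_string.split())#get rid of unnecessary blanks
-- ===== SOURCE B (Python) =====
-- def get_string_adopted_for_search(search_string, is_query=False):
--     s = search_string.lower()
--     # split the lowered string into maximal runs of constant digit-status
--     runs = []
--     cur = ''
--     d = False
--     for c in s:
--         if not cur or c.isdigit() == d:
--             cur += c
--         else:
--             runs.append(cur)
--             cur = c
--         d = c.isdigit()
--     if cur:
--         runs.append(cur)
--     # translate each run, then join runs with a space (the digit/letter boundary)
--     pieces = []
--     for run in runs:
--         buf = []
--         for c in run: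
--             if c.isdigit() or c.isalpha():
--                 buf.append(c)
--             elif c == '*' and is_query:
--                 buf.append('* ')
--             else:
--                 buf.append(' ')
--         pieces.append(''.join(buf))
--     return ' '.join(' '.join(pieces).split())
-- ===== Notes on version B (the rewrite author's own statement) =====
-- stated objective: alternative
-- what changed: Replaced the prev-char state machine that interleaves boundary spaces character by character with a run-based traversal: split the lowered string into maximal runs of constant digit-status, translate each run, and join runs with a space before the final whitespace collapse.
import Mathlib
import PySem

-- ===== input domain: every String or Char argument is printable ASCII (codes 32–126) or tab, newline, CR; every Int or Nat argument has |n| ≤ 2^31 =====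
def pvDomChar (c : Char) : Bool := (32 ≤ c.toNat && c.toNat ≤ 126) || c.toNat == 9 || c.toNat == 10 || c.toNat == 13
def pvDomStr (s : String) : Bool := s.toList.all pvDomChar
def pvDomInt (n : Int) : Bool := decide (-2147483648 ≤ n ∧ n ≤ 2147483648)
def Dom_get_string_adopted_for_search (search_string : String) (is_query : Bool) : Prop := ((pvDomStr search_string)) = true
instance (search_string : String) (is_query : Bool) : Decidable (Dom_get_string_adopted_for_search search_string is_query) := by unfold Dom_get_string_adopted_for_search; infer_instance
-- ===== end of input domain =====

-- B replaces A's prev-char state machine with a run-based traversal (split into maximal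
-- digit-status runs, translate each run, join runs with a space); alternative decomposition, same cost.

-- ===== PORT A =====
-- one loop iteration of A: state = (result_string, prev_char), prev_char kept as a List Char ('' = [])
def pvStepA (is_query : Bool) (st : List Char × List Char) (curr : Char) : List Char × List Char :=
  let r1 := if PySem.Chars.isdigit curr ≠ PySem.Chars.strIsdigit st.2 then st.1 ++ [' '] else st.1
  let r2 :=
    if PySem.Chars.isdigit curr || PySem.Chars.isalpha curr then r1 ++ [curr]
    else if curr == '*' && is_query then r1 ++ [curr, ' ']
    else r1 ++ [' ']
  (r2, [curr])

def get_string_adopted_for_search (search_string : String) (is_query : Bool) : String :=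
  String.mk (PySem.Chars.join [' ']
    (PySem.Chars.split₀ ((PySem.Chars.lower search_string.toList).foldl (pvStepA is_query) ([], [])).1))

-- ===== PORT B =====
-- per-char translation inside a run
def pvOutB (is_query : Bool) (c : Char) : List Char :=
  if PySem.Chars.isdigit c || PySem.Chars.isalpha c then [c]
  else if c == '*' && is_query then ['*', ' ']
  else [' ']

-- maximal runs of constant digit-status (cur = run being built, d = its digit-status)
def pvRunsGo (cur : List Char) (d : Bool) : List Char → List (List Char)
  | [] => [cur]
  | c :: cs =>
    if PySem.Chars.isdigit c == d then pvRunsGo (cur ++ [c]) d cs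
    else cur :: pvRunsGo [c] (PySem.Chars.isdigit c) cs

def pvRunsOf : List Char → List (List Char)
  | [] => []
  | c :: cs => pvRunsGo [c] (PySem.Chars.isdigit c) cs

def get_string_adopted_for_search_alt (search_string : String) (is_query : Bool) : String :=
  String.mk (PySem.Chars.join [' '] (PySem.Chars.split₀ (PySem.Chars.join [' ']
    ((pvRunsOf (PySem.Chars.lower search_string.toList)).map (fun run => run.flatMap (pvOutB is_query))))))

-- ===== PRECONDITION & SPEC =====
def Spec_get_string_adopted_for_search (search_string : String) (is_query : Bool) (out : String) : Prop := out = get_string_adopted_for_search_alt search_string is_query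
instance (search_string : String) (is_query : Bool) (out : String) : Decidable (Spec_get_string_adopted_for_search search_string is_query out) := by unfold Spec_get_string_adopted_for_search; infer_instance

-- ===== CLAIM (what is proved, stated in full; the proofs are below) =====
def Claim_equal_get_string_adopted_for_search : Prop := ∀ (search_string : String) (is_query : Bool), Dom_get_string_adopted_for_search search_string is_query → Spec_get_string_adopted_for_search search_string is_query (get_string_adopted_for_search search_string is_query)

-- ===== LEMMAS AND PROOFS =====
-- common recursive form: output for the rest of the string, given the digit-status d of the previous char
def pvBrec (isq : Bool) (d : Bool) : List Char → List Char
  | [] => []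
  | c :: cs =>
    (if PySem.Chars.isdigit c == d then [] else [' ']) ++ pvOutB isq c ++ pvBrec isq (PySem.Chars.isdigit c) cs

theorem pvFoldA (isq : Bool) : ∀ (l : List Char) (acc prev : List Char),
    (l.foldl (pvStepA isq) (acc, prev)).1 = acc ++ pvBrec isq (PySem.Chars.strIsdigit prev) l := by
  intro l
  induction l with
  | nil => intro acc prev; simp [pvBrec]
  | cons c cs ih =>
    intro acc prev
    have hstep : pvStepA isq (acc, prev) c =
        (acc ++ (if PySem.Chars.isdigit c == PySem.Chars.strIsdigit prev then ([] : List Char) else [' '])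
             ++ pvOutB isq c, [c]) := by
      simp only [pvStepA, pvOutB]
      by_cases h : PySem.Chars.isdigit c = PySem.Chars.strIsdigit prev <;>
        simp [h] <;> split_ifs <;> simp_all
    have hprev : PySem.Chars.strIsdigit [c] = PySem.Chars.isdigit c := by
      simp [PySem.Chars.strIsdigit]
    simp only [List.foldl_cons, hstep]
    rw [ih]
    simp [pvBrec, hprev]

def pvPieces (isq : Bool) (rs : List (List Char)) : List Char :=
  PySem.Chars.join [' '] (rs.map (fun run => run.flatMap (pvOutB isq)))

theorem pvRunsGo_cons : ∀ (l cur : List Char) (d : Bool), ∃ r rs, pvRunsGo cur d l = r :: rs := by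
  intro l
  induction l with
  | nil => intro cur d; exact ⟨cur, [], rfl⟩
  | cons c cs ih =>
    intro cur d
    by_cases h : PySem.Chars.isdigit c = d
    · simpa [pvRunsGo, h] using ih (cur ++ [c]) d
    · exact ⟨cur, pvRunsGo [c] (PySem.Chars.isdigit c) cs, by simp [pvRunsGo, h]⟩

theorem pvFoldB (isq : Bool) : ∀ (l cur : List Char) (d : Bool),
    pvPieces isq (pvRunsGo cur d l) = cur.flatMap (pvOutB isq) ++ pvBrec isq d l := by
  intro l
  induction l with
  | nil => intro cur d; simp [pvRunsGo, pvPieces, PySem.Chars.join_singleton, pvBrec]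
  | cons c cs ih =>
    intro cur d
    by_cases h : PySem.Chars.isdigit c = d
    · rw [show pvRunsGo cur d (c :: cs) = pvRunsGo (cur ++ [c]) d cs by simp [pvRunsGo, h], ih]
      simp [pvBrec, h]
    · rw [show pvRunsGo cur d (c :: cs) = cur :: pvRunsGo [c] (PySem.Chars.isdigit c) cs by
        simp [pvRunsGo, h]]
      obtain ⟨r, rs, hr⟩ := pvRunsGo_cons cs [c] (PySem.Chars.isdigit c)
      have := ih [c] (PySem.Chars.isdigit c)
      rw [hr] at this ⊢
      simp only [pvPieces, List.map_cons, PySem.Chars.join_cons_cons] at this ⊢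
      rw [this]
      simp [pvBrec, h]

theorem pvSplit0_space (xs : List Char) : PySem.Chars.split₀ (' ' :: xs) = PySem.Chars.split₀ xs := by
  simp [PySem.Chars.split₀, PySem.Chars.split₀.go, PySem.Chars.isspace]

-- ===== VERDICT (by name: the statement is the Claim_ definition above) =====
theorem get_string_adopted_for_search_spec : Claim_equal_get_string_adopted_for_search := by
  intro s isq _
  unfold Spec_get_string_adopted_for_search get_string_adopted_for_search get_string_adopted_for_search_alt
  rcases hl : PySem.Chars.lower s.toList with _ | ⟨c, cs⟩
  · simp [pvRunsOf, PySem.Chars.join_nil, PySem.Chars.split₀, PySem.Chars.split₀.go]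
  · rw [pvFoldA isq (c :: cs) [] []]
    have hB : PySem.Chars.join [' ']
        ((pvRunsOf (c :: cs)).map (fun run => run.flatMap (pvOutB isq))) =
        pvOutB isq c ++ pvBrec isq (PySem.Chars.isdigit c) cs := by
      have := pvFoldB isq cs [c] (PySem.Chars.isdigit c)
      simpa [pvRunsOf, pvPieces] using this
    rw [hB]
    have hnil : PySem.Chars.strIsdigit ([] : List Char) = false := by
      simp [PySem.Chars.strIsdigit]
    rw [hnil]
    by_cases hd : PySem.Chars.isdigit c = true
    · simp [pvBrec, hd, pvSplit0_space]
    · simp [pvBrec, Bool.of_not_eq_true hd]
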